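-- pv_equiv track=rewrite | github.com/spenteco/nanogenmo2016 | nplus_functions/fix_quotes.py | fix_quotes
-- ===== SOURCE A (Python) =====
-- def fix_quotes(fixed_p):
--
--     for i in range(0, len(fixed_p)):
--
--         if fixed_p[i:i + 1] == '"':
--             if i == 0:
--                 fixed_p = '``' + fixed_p[1:]
--             else:
--                 if fixed_p[i - 1:i] == ' ':
--                     fixed_p = fixed_p[:i] + '``' + fixed_p[i + 1:]
--
--         if fixed_p[i:i + 1] == '\'':
--             if i == 0:
--                 fixed_p = '`' + fixed_p[1:]
--             else:
--                 if fixed_p[i - 1:i] == ' ':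
--                     fixed_p = fixed_p[:i] + '`' + fixed_p[i + 1:]
--
--     return fixed_p
-- ===== SOURCE B (Python) =====
-- def fix_quotes(fixed_p):
--     # One pass: a quote at the start or right after a space becomes backtick(s).
--     out = []
--     prev = None
--     for c in fixed_p:
--         if c == '"' and (prev is None or prev == ' '):
--             out.append('``')
--         elif c == "'" and (prev is None or prev == ' '):
--             out.append('`')
--         else:
--             out.append(c)
--         prev = c
--     return ''.join(out)
-- ===== Notes on version B (the rewrite author's own statement) =====
-- stated objective: faster
-- what changed: A rescans and rebuilds the whole string by slicing inside an index loop; B is a single left-to-right pass that emits backticks for quotes at the start or after a space.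
-- intended difference: When a quote that starts the string or follows a space lies within the last k characters, k being the number of such double quotes converted before it, A's loop over the original length never reaches it (each double-quote conversion grows the string by one) and returns it unconverted, while B converts it as intended. — e.g. on fix_quotes("\" '"): A returns "`` '", B returns "`` `"
import Mathlib
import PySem

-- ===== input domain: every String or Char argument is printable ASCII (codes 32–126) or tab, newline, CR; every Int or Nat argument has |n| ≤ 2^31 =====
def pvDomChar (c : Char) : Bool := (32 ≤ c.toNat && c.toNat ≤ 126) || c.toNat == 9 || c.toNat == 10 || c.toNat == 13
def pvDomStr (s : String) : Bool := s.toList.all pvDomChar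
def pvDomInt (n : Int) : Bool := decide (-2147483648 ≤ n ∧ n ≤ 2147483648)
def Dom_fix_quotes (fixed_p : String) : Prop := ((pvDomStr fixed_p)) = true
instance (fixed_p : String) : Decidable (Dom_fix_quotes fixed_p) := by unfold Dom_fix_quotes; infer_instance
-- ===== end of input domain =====

-- B replaces A's rescan-and-rebuild index loop by one left-to-right pass
-- (objective: faster); on D_ (a convertible quote in the tail A's fixed-length
-- loop never reaches after double-quote insertions) B converts where A does not.

-- ===== PORT A =====
-- A's first if-statement (the double-quote case), on the current string as List Char.
def stepA1 (t : List Char) (i : Int) : List Char :=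
  if PySem.List.slice t (some i) (some (i + 1)) = ['"'] then
    if i = 0 then ['`', '`'] ++ PySem.List.slice t (some 1) none
    else if PySem.List.slice t (some (i - 1)) (some i) = [' '] then
      PySem.List.slice t none (some i) ++ ['`', '`'] ++ PySem.List.slice t (some (i + 1)) none
    else t
  else t

-- A's loop body: the double-quote if-statement, then the single-quote if-statement on the updated string.
def stepA (t : List Char) (i : Int) : List Char :=
  let t1 := stepA1 t i
  if PySem.List.slice t1 (some i) (some (i + 1)) = ['\''] then
    if i = 0 then ['`'] ++ PySem.List.slice t1 (some 1) none
    else if PySem.List.slice t1 (some (i - 1)) (some i) = [' '] then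
      PySem.List.slice t1 none (some i) ++ ['`'] ++ PySem.List.slice t1 (some (i + 1)) none
    else t1
  else t1

def fix_quotes (fixed_p : String) : String :=
  String.ofList ((PySem.List.pyRange 0 (fixed_p.toList.length : Int) 1).foldl stepA fixed_p.toList)

-- ===== PORT B =====
-- Source B's loop: prev is the previous original character (none at the start); out
-- accumulates the emitted pieces, joined at the end.
def fixB_loop (prev : Option Char) (chars : List Char) (out : List String) : List String :=
  match chars with
  | [] => out
  | c :: cs =>
    if c = '"' ∧ (prev = none ∨ prev = some ' ') then fixB_loop (some c) cs (out ++ ["``"])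
    else if c = '\'' ∧ (prev = none ∨ prev = some ' ') then fixB_loop (some c) cs (out ++ ["`"])
    else fixB_loop (some c) cs (out ++ [String.ofList [c]])

def fix_quotes_alt (fixed_p : String) : String :=
  String.join (fixB_loop none fixed_p.toList [])

-- ===== PRECONDITION & SPEC =====
-- each character paired with its predecessor (a space for the first one) and its index
def pvPairs (l : List Char) : List ((Char × Char) × Nat) :=
  List.zipIdx (List.zipWith Prod.mk (' ' :: l) l)
-- a double quote right after a space (or at the start)
def pvIsDQ (x : (Char × Char) × Nat) : Bool := x.1 == (' ', '"')
-- either quote right after a space (or at the start)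
def pvIsQ (x : (Char × Char) × Nat) : Bool := pvIsDQ x || x.1 == (' ', '\'')

-- When a quote at the start / after a space sits within the last k characters of the
-- string, k being the number of such double quotes before it, A's fixed-length loop (the
-- string grows by one per double-quote conversion) never reaches it and returns it
-- unconverted; B converts it as intended.
def D_fix_quotes (fixed_p : String) : Prop :=
  ∃ x ∈ pvPairs fixed_p.toList, pvIsQ x ∧
    fixed_p.toList.length ≤ x.2 + List.countP pvIsDQ (List.take x.2 (pvPairs fixed_p.toList))
instance (fixed_p : String) : Decidable (D_fix_quotes fixed_p) := by unfold D_fix_quotes; infer_instance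

def Spec_fix_quotes (fixed_p : String) (out : String) : Prop := ¬ D_fix_quotes fixed_p → out = fix_quotes_alt fixed_p
instance (fixed_p : String) (out : String) : Decidable (Spec_fix_quotes fixed_p out) := by unfold Spec_fix_quotes; infer_instance

def pvDiffWitness_fix_quotes : String := "\" '"
def pvDiffWitnessOut_fix_quotes : String × String := ("`` '", "`` `")

-- ===== CLAIM (what is proved, stated in full; the proofs are below) =====
def Claim_unchanged_fix_quotes : Prop := ∀ (fixed_p : String), Dom_fix_quotes fixed_p → Spec_fix_quotes fixed_p (fix_quotes fixed_p)
def Claim_changed_fix_quotes : Prop := Dom_fix_quotes (pvDiffWitness_fix_quotes) ∧ D_fix_quotes (pvDiffWitness_fix_quotes) ∧ fix_quotes (pvDiffWitness_fix_quotes) = pvDiffWitnessOut_fix_quotes.1 ∧ fix_quotes_alt (pvDiffWitness_fix_quotes) = pvDiffWitnessOut_fix_quotes.2 ∧ pvDiffWitnessOut_fix_quotes.1 ≠ pvDiffWitnessOut_fix_quotes.2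
def Claim_exact_fix_quotes : Prop := ∀ (fixed_p : String), Dom_fix_quotes fixed_p → D_fix_quotes fixed_p → fix_quotes fixed_p ≠ fix_quotes_alt fixed_p

-- ===== LEMMAS AND PROOFS =====

-- proof-side view of B: the one-pass transformation as a character list
def fixB (prev : Option Char) (rest : List Char) : List Char :=
  match rest with
  | [] => []
  | c :: cs =>
    if c = '"' ∧ (prev = none ∨ prev = some ' ') then '`' :: '`' :: fixB (some c) cs
    else if c = '\'' ∧ (prev = none ∨ prev = some ' ') then '`' :: fixB (some c) cs
    else c :: fixB (some c) cs

-- proof-side conversion condition and convertible-double-quote count, in index form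
def pvIsConv (l : List Char) (j : Nat) : Bool := decide (j = 0) || decide (l.getD (j - 1) ' ' = ' ')
def pvDQLag (l : List Char) (j : Nat) : Nat := ((pvPairs l).take j).countP pvIsDQ

lemma pvPairs_eq_zip (l : List Char) : pvPairs l = (List.zip (' ' :: l) l).zipIdx := rfl

lemma pvZip_getElem? (l : List Char) (j : Nat) (h : j < l.length) :
    (List.zip (' ' :: l) l)[j]? = some ((' ' :: l).getD j ' ', l.getD j ' ') := by
  have h1 : j < (' ' :: l).length := by simp; omega
  rw [List.getElem?_eq_getElem (by simp [List.length_zip]; omega)]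
  rw [List.getD_eq_getElem l ' ' h, List.getD_eq_getElem _ ' ' h1]
  simp [List.getElem_zip]

lemma pvPairs_length (l : List Char) : (pvPairs l).length = l.length := by
  simp [pvPairs_eq_zip]

lemma pvPairs_getElem? (l : List Char) (j : Nat) (h : j < l.length) :
    (pvPairs l)[j]? = some (((' ' :: l).getD j ' ', l.getD j ' '), j) := by
  rw [pvPairs_eq_zip, List.getElem?_eq_getElem (by simp [List.length_zip]; omega)]
  rw [List.getElem_zipIdx]
  have := pvZip_getElem? l j h
  rw [List.getElem?_eq_getElem (by simp [List.length_zip]; omega)] at this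
  simp only [Option.some.injEq] at this
  simp [this]

-- the pair at j is a convertible double quote iff the index form says so
lemma pvIsDQ_at (l : List Char) (j : Nat) (h : j < l.length) :
    pvIsDQ (((' ' :: l).getD j ' ', l.getD j ' '), j) = (decide (l.getD j ' ' = '"') && pvIsConv l j) := by
  cases j with
  | zero =>
    rw [Bool.eq_iff_iff]
    simp [pvIsDQ, pvIsConv, Prod.ext_iff]
  | succ k =>
    rw [Bool.eq_iff_iff]
    simp only [pvIsDQ, pvIsConv, List.getD_cons_succ, Nat.add_sub_cancel]
    simp [Prod.ext_iff, and_comm]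

lemma pvDQLag_succ (l : List Char) (j : Nat) (h : j < l.length) :
    pvDQLag l (j + 1) = pvDQLag l j + (if l.getD j ' ' = '"' ∧ pvIsConv l j = true then 1 else 0) := by
  unfold pvDQLag
  rw [List.take_add_one, List.countP_append, pvPairs_getElem? l j h]
  simp only [Option.toList_some, List.countP_singleton, pvIsDQ_at l j h]
  congr 1
  simp [Bool.and_eq_true]

lemma pvDQLag_stable (l : List Char) (j : Nat) (h : l.length ≤ j) :
    pvDQLag l (j + 1) = pvDQLag l j := by
  unfold pvDQLag
  rw [List.take_of_length_le (by simp [pvPairs_length]; omega),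
    List.take_of_length_le (by simp [pvPairs_length]; omega)]

-- proof-side intermediate form of A's loop: one pass over the original characters,
-- `lag` counting double-quote insertions; when j + lag reaches the original length A's
-- remaining iterations never reach the suffix.
def fixB_go (orig : List Char) (j lag : Nat) (rest : List Char) : List Char :=
  match rest with
  | [] => []
  | c :: cs =>
    if orig.length ≤ j + lag then c :: cs
    else if c = '"' ∧ (j = 0 ∨ orig.getD (j - 1) ' ' = ' ') then
      '`' :: '`' :: fixB_go orig (j + 1) (lag + 1) cs
    else if c = '\'' ∧ (j = 0 ∨ orig.getD (j - 1) ' ' = ' ') then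
      '`' :: fixB_go orig (j + 1) lag cs
    else c :: fixB_go orig (j + 1) lag cs

-- the one-character slice t[L:L+1] at the junction of `pre ++ c :: cs`, L = pre.length
lemma slice_at_len (pre : List Char) (c : Char) (cs : List Char) :
    PySem.List.slice (pre ++ c :: cs) (some (pre.length : Int)) ((some ((pre.length : Int) + 1))) = [c] := by
  have h : ((pre.length : Int) + 1) = ((pre.length + 1 : Nat) : Int) := by push_cast; ring
  rw [h, PySem.List.slice_natCast]
  simp

-- the one-character slice t[L-1:L] when t = (pre ++ [d]) ++ rest, L = pre.length + 1
lemma slice_prev (pre : List Char) (d : Char) (rest : List Char) :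
    PySem.List.slice ((pre ++ [d]) ++ rest) (some (((pre.length + 1 : Nat) : Int) - 1))
      (some ((pre.length + 1 : Nat) : Int)) = [d] := by
  have h : (((pre.length + 1 : Nat) : Int) - 1) = ((pre.length : Nat) : Int) := by push_cast; ring
  rw [h, PySem.List.slice_natCast, List.append_assoc, List.drop_left]
  simp

lemma slice_take_len (pre rest : List Char) :
    PySem.List.slice (pre ++ rest) none (some (pre.length : Int)) = pre := by
  rw [PySem.List.slice_to_natCast]; simp

lemma slice_drop_len1 (pre : List Char) (c : Char) (cs : List Char) :
    PySem.List.slice (pre ++ c :: cs) (some ((pre.length : Int) + 1)) none = cs := by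
  have h : ((pre.length : Int) + 1) = ((pre.length + 1 : Nat) : Int) := by push_cast; ring
  rw [h, PySem.List.slice_from_natCast,
    show pre ++ c :: cs = (pre ++ [c]) ++ cs by simp,
    show pre.length + 1 = (pre ++ [c]).length by simp, List.drop_left]

lemma fixB_go_of_le (orig : List Char) (j lag : Nat) (rest : List Char)
    (h : orig.length ≤ j + lag) : fixB_go orig j lag rest = rest := by
  cases rest with
  | nil => rfl
  | cons c cs => simp [fixB_go, h]

-- stepA with the result of the first if-statement substituted in
lemma stepA_second (t t1 : List Char) (i : Int) (h1 : stepA1 t i = t1) :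
    stepA t i =
      if PySem.List.slice t1 (some i) (some (i + 1)) = ['\''] then
        if i = 0 then ['`'] ++ PySem.List.slice t1 (some 1) none
        else if PySem.List.slice t1 (some (i - 1)) (some i) = [' '] then
          PySem.List.slice t1 none (some i) ++ ['`'] ++ PySem.List.slice t1 (some (i + 1)) none
        else t1
      else t1 := by
  unfold stepA
  rw [h1]

-- stepA when the first if fired (t1 known) and the examined char of t1 is not '\''
lemma stepA_of_first (t t1 : List Char) (i : Int) (h1 : stepA1 t i = t1)
    (h2 : PySem.List.slice t1 (some i) (some (i + 1)) ≠ ['\'']) : stepA t i = t1 := by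
  rw [stepA_second t t1 i h1, if_neg h2]

-- stepA is a no-op at an index whose character is a backtick with a predecessor
lemma stepA_backtick (pre : List Char) (cs : List Char) :
    stepA ((pre ++ ['`']) ++ '`' :: cs) (((pre ++ ['`']).length : Int)) = (pre ++ ['`']) ++ '`' :: cs := by
  have h1 := slice_at_len (pre ++ ['`']) '`' cs
  refine stepA_of_first _ _ _ ?_ ?_
  · unfold stepA1; rw [h1, if_neg (by decide)]
  · rw [h1]; decide

-- main invariant: A's remaining iterations produce exactly fixB_go's continuation.
-- done = the transformed prefix for the first j original chars (length j + lag),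
-- rest = the original suffix from j; the side condition ties done's last char to orig[j-1].
lemma main_inv (orig : List Char) : ∀ (rest done : List Char) (j lag : Nat),
    rest = orig.drop j → done.length = j + lag → (j = 0 → lag = 0) →
    (j ≠ 0 → ∃ d, done.getLast? = some d ∧ (d = ' ' ↔ orig.getD (j - 1) ' ' = ' ')) →
    (PySem.List.pyRange ((j + lag : Nat) : Int) (orig.length : Int) 1).foldl stepA (done ++ rest)
      = done ++ fixB_go orig j lag rest := by
  intro rest
  induction rest with
  | nil =>
    intro done j lag hrest hlen _ _
    have hj : orig.length ≤ j := by
      have := congrArg List.length hrest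
      simp at this; omega
    rw [PySem.List.pyRange_one_eq_nil (by exact_mod_cast by omega)]
    simp [fixB_go]
  | cons c cs ih =>
    intro done j lag hrest hlen hlag0 hprev
    have hjn : j < orig.length := by
      have := congrArg List.length hrest
      simp at this; omega
    have hget : orig[j]? = some c := by
      have h1 : (orig.drop j).head? = some c := by rw [← hrest]; rfl
      rwa [List.head?_drop] at h1
    have hcj : orig.getD j ' ' = c := by
      rw [List.getD_eq_getElem?_getD, hget]; rfl
    have hcs : cs = orig.drop (j + 1) := by
      have h2 : (orig.drop j).tail = cs := by rw [← hrest]; rfl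
      rw [← h2, List.tail_drop]
    by_cases hbudget : orig.length ≤ j + lag
    · rw [PySem.List.pyRange_one_eq_nil (by exact_mod_cast hbudget)]
      simp [fixB_go, hbudget]
    · rw [not_le] at hbudget
      rw [PySem.List.pyRange_one_cons (by exact_mod_cast hbudget), List.foldl_cons]
      have hL : ((j + lag : Nat) : Int) = (done.length : Int) := by exact_mod_cast hlen.symm
      have hslice1 : PySem.List.slice (done ++ c :: cs) (some ((j + lag : Nat) : Int))
          (some (((j + lag : Nat) : Int) + 1)) = [c] := by
        rw [hL]; exact slice_at_len done c cs
      -- data about the predecessor character when j ≠ 0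
      have hprevslice : j ≠ 0 → ∀ (rest' : List Char),
          ∃ d, PySem.List.slice (done ++ rest') (some (((j + lag : Nat) : Int) - 1))
            (some ((j + lag : Nat) : Int)) = [d] ∧ (d = ' ' ↔ orig.getD (j - 1) ' ' = ' ') := by
        intro hj0 rest'
        obtain ⟨d, hd, hiff⟩ := hprev hj0
        have hne : done ≠ [] := by intro h; rw [h] at hd; simp at hd
        have hg : done.getLast hne = d := by
          rw [List.getLast?_eq_some_getLast hne] at hd
          exact (Option.some_injective _ hd)
        have hdec : done = done.dropLast ++ [d] := by
          rw [← hg]; exact (List.dropLast_append_getLast hne).symm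
        have hlen2 : done.dropLast.length + 1 = j + lag := by
          have h3 : done.dropLast.length = done.length - 1 := List.length_dropLast
          have hpos : 0 < done.length := List.length_pos_of_ne_nil hne
          omega
        refine ⟨d, ?_, hiff⟩
        have := slice_prev done.dropLast d rest'
        rw [hlen2] at this
        rw [hdec, List.append_assoc] at this ⊢
        simpa using this
      by_cases hq1 : c = '"' ∧ (j = 0 ∨ orig.getD (j - 1) ' ' = ' ')
      · -- a double quote is replaced by two backticks: the state grows; a catch-up iteration may follow
        obtain ⟨hc, hcond⟩ := hq1
        subst hc
        have hsl2 : PySem.List.slice (done ++ '`' :: '`' :: cs) (some ((j + lag : Nat) : Int))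
            (some (((j + lag : Nat) : Int) + 1)) = ['`'] := by
          rw [hL]; exact slice_at_len done '`' ('`' :: cs)
        have hstep : stepA (done ++ '"' :: cs) ((j + lag : Nat) : Int) = done ++ '`' :: '`' :: cs := by
          refine stepA_of_first _ _ _ ?_ (by rw [hsl2]; decide)
          unfold stepA1
          rw [hslice1, if_pos rfl]
          by_cases hj0 : j = 0
          · have hlag : lag = 0 := hlag0 hj0
            have hd0 : done = [] := List.eq_nil_of_length_eq_zero (by omega)
            subst hj0 hlag hd0
            rw [if_pos (by norm_num), PySem.List.slice_from_one]
            simp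
          · have hi0 : ((j + lag : Nat) : Int) ≠ 0 := by
              have : 0 < j + lag := by omega
              exact_mod_cast Nat.pos_iff_ne_zero.mp this
            have hsp : orig.getD (j - 1) ' ' = ' ' := by
              rcases hcond with h | h
              · exact absurd h hj0
              · exact h
            obtain ⟨d, hds, hiff⟩ := hprevslice hj0 ('"' :: cs)
            rw [if_neg hi0, hds, hiff.mpr hsp, if_pos rfl]
            rw [hL, slice_take_len,
              show ((done.length : Int) + 1) = ((j + lag : Nat) : Int) + 1 by rw [hL], hL,
              slice_drop_len1]
            simp
        rw [hstep]
        have hB : fixB_go orig j lag ('"' :: cs)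
            = '`' :: '`' :: fixB_go orig (j + 1) (lag + 1) cs := by
          rw [fixB_go]
          rw [if_neg (by omega), if_pos ⟨rfl, hcond⟩]
        rw [hB]
        by_cases hend : j + lag + 1 < orig.length
        · -- catch-up step on the inserted second backtick, then induction
          rw [PySem.List.pyRange_one_cons (by exact_mod_cast hend), List.foldl_cons]
          have hcu : stepA (done ++ '`' :: '`' :: cs) (((j + lag : Nat) : Int) + 1)
              = done ++ '`' :: '`' :: cs := by
            have hbt := stepA_backtick done cs
            have e1 : (((done ++ ['`']).length : Nat) : Int) = ((j + lag : Nat) : Int) + 1 := by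
              push_cast
              simp [hlen]
            rw [e1] at hbt
            simpa using hbt
          rw [hcu]
          have e2 : ((j + lag : Nat) : Int) + 1 + 1 = (((j + 1) + (lag + 1) : Nat) : Int) := by
            push_cast; ring
          rw [e2]
          have hmain := ih (done ++ ['`', '`']) (j + 1) (lag + 1) hcs
            (by simp [hlen]; omega) (by omega)
            (by
              intro _
              refine ⟨'`', by simp, ?_⟩
              simp only [Nat.add_sub_cancel, hcj]
              constructor <;> intro h <;> simp_all)
          simpa using hmain
        · -- the budget runs out right after the insertion: nothing more changes
          rw [PySem.List.pyRange_one_eq_nil (by push_cast; omega), List.foldl_nil]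
          rw [fixB_go_of_le orig (j + 1) (lag + 1) cs (by omega)]
      · by_cases hq2 : c = '\'' ∧ (j = 0 ∨ orig.getD (j - 1) ' ' = ' ')
        · -- '\'' is replaced by '`': same length, no catch-up
          obtain ⟨hc, hcond⟩ := hq2
          subst hc
          have hstep : stepA (done ++ '\'' :: cs) ((j + lag : Nat) : Int) = done ++ '`' :: cs := by
            have h1 : stepA1 (done ++ '\'' :: cs) ((j + lag : Nat) : Int) = done ++ '\'' :: cs := by
              unfold stepA1; rw [hslice1, if_neg (by decide)]
            rw [stepA_second _ _ _ h1, hslice1, if_pos rfl]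
            by_cases hj0 : j = 0
            · have hlag : lag = 0 := hlag0 hj0
              have hd0 : done = [] := List.eq_nil_of_length_eq_zero (by omega)
              subst hj0 hlag hd0
              rw [if_pos (by norm_num), PySem.List.slice_from_one]
              simp
            · have hi0 : ((j + lag : Nat) : Int) ≠ 0 := by
                have : 0 < j + lag := by omega
                exact_mod_cast Nat.pos_iff_ne_zero.mp this
              have hsp : orig.getD (j - 1) ' ' = ' ' := by
                rcases hcond with h | h
                · exact absurd h hj0
                · exact h
              obtain ⟨d, hds, hiff⟩ := hprevslice hj0 ('\'' :: cs)
              rw [if_neg hi0, hds, hiff.mpr hsp, if_pos rfl]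
              rw [hL, slice_take_len,
                show ((done.length : Int) + 1) = ((j + lag : Nat) : Int) + 1 by rw [hL], hL,
                slice_drop_len1]
              simp
          rw [hstep]
          have hB : fixB_go orig j lag ('\'' :: cs)
              = '`' :: fixB_go orig (j + 1) lag cs := by
            rw [fixB_go]
            rw [if_neg (by omega), if_neg hq1, if_pos ⟨rfl, hcond⟩]
          rw [hB]
          have e2 : ((j + lag : Nat) : Int) + 1 = (((j + 1) + lag : Nat) : Int) := by
            push_cast; ring
          rw [e2]
          have hmain := ih (done ++ ['`']) (j + 1) lag hcs
            (by simp [hlen]; omega) (by omega)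
            (by
              intro _
              refine ⟨'`', by simp, ?_⟩
              simp only [Nat.add_sub_cancel, hcj]
              constructor <;> intro h <;> simp_all)
          simpa using hmain
        · -- no replacement: the character is copied unchanged
          have hi0' : j ≠ 0 → ((j + lag : Nat) : Int) ≠ 0 := by
            intro hj0
            have : 0 < j + lag := by omega
            exact_mod_cast Nat.pos_iff_ne_zero.mp this
          have h1 : stepA1 (done ++ c :: cs) ((j + lag : Nat) : Int) = done ++ c :: cs := by
            unfold stepA1
            by_cases hcq : c = '"'
            · subst hcq
              have hj0 : j ≠ 0 := fun h => hq1 ⟨rfl, Or.inl h⟩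
              have hnsp : ¬ orig.getD (j - 1) ' ' = ' ' := fun h => hq1 ⟨rfl, Or.inr h⟩
              obtain ⟨d, hds, hiff⟩ := hprevslice hj0 ('"' :: cs)
              rw [hslice1, if_pos rfl, if_neg (hi0' hj0), hds,
                if_neg (by intro h; injection h with h; exact hnsp (hiff.mp h))]
            · rw [hslice1, if_neg (by intro h; injection h with h; exact hcq h)]
          have hstep : stepA (done ++ c :: cs) ((j + lag : Nat) : Int) = done ++ c :: cs := by
            rw [stepA_second _ _ _ h1, hslice1]
            by_cases hcq : c = '\''
            · subst hcq
              have hj0 : j ≠ 0 := fun h => hq2 ⟨rfl, Or.inl h⟩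
              have hnsp : ¬ orig.getD (j - 1) ' ' = ' ' := fun h => hq2 ⟨rfl, Or.inr h⟩
              obtain ⟨d, hds, hiff⟩ := hprevslice hj0 ('\'' :: cs)
              rw [if_pos rfl, if_neg (hi0' hj0), hds,
                if_neg (by intro h; injection h with h; exact hnsp (hiff.mp h))]
            · rw [if_neg (by intro h; injection h with h; exact hcq h)]
          rw [hstep]
          have hB : fixB_go orig j lag (c :: cs) = c :: fixB_go orig (j + 1) lag cs := by
            rw [fixB_go]
            rw [if_neg (by omega), if_neg hq1, if_neg hq2]
          rw [hB]
          have e2 : ((j + lag : Nat) : Int) + 1 = (((j + 1) + lag : Nat) : Int) := by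
            push_cast; ring
          rw [e2]
          have hmain := ih (done ++ [c]) (j + 1) lag hcs
            (by simp [hlen]; omega) (by omega)
            (by
              intro _
              refine ⟨c, by simp, ?_⟩
              simp only [Nat.add_sub_cancel, hcj])
          simpa using hmain

-- pvDQLag at 0
lemma pvDQLag_zero (l : List Char) : pvDQLag l 0 = 0 := rfl

-- the prev-to-index correspondence carried one step forward
lemma prev_iff_step (l : List Char) (j : Nat) (c : Char) (hcj : l.getD j ' ' = c) :
    ((some c = none ∨ some c = some ' ') ↔ (j + 1 = 0 ∨ l.getD (j + 1 - 1) ' ' = ' ')) := by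
  simp only [Nat.add_sub_cancel, hcj]
  simp

-- j + pvDQLag l j is monotone in j
lemma lag_mono (l : List Char) (j d : Nat) :
    j + pvDQLag l j ≤ (j + d) + pvDQLag l (j + d) := by
  induction d with
  | zero => simp
  | succ d ih =>
    rw [show j + (d + 1) = (j + d) + 1 by omega]
    by_cases h : j + d < l.length
    · rw [pvDQLag_succ l (j + d) h]; split_ifs <;> omega
    · rw [pvDQLag_stable l (j + d) (by omega)]; omega

-- the conversion condition, as fixB_go states it, matches pvIsConv
lemma pvIsConv_iff (l : List Char) (j : Nat) :
    pvIsConv l j = true ↔ (j = 0 ∨ l.getD (j - 1) ' ' = ' ') := by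
  simp [pvIsConv]

-- fixB is the identity on a suffix containing no convertible quote
lemma fixB_id (l : List Char) : ∀ (rest : List Char) (j : Nat) (prev : Option Char),
    rest = l.drop j →
    ((prev = none ∨ prev = some ' ') ↔ (j = 0 ∨ l.getD (j - 1) ' ' = ' ')) →
    (∀ j', j ≤ j' → j' < l.length →
      ¬ ((l.getD j' ' ' = '"' ∨ l.getD j' ' ' = '\'') ∧ (j' = 0 ∨ l.getD (j' - 1) ' ' = ' '))) →
    fixB prev rest = rest := by
  intro rest
  induction rest with
  | nil => intro j prev _ _ _; rfl
  | cons c cs ih =>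
    intro j prev hrest hiff hnone
    have hjn : j < l.length := by
      have := congrArg List.length hrest; simp at this; omega
    have hget : l[j]? = some c := by
      have h1 : (l.drop j).head? = some c := by rw [← hrest]; rfl
      rwa [List.head?_drop] at h1
    have hcj : l.getD j ' ' = c := by rw [List.getD_eq_getElem?_getD, hget]; rfl
    have hcs : cs = l.drop (j + 1) := by
      have h2 : (l.drop j).tail = cs := by rw [← hrest]; rfl
      rw [← h2, List.tail_drop]
    have hnc : ¬ ((c = '"' ∨ c = '\'') ∧ (prev = none ∨ prev = some ' ')) := by
      intro ⟨h1, h2⟩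
      exact hnone j le_rfl hjn ⟨by rw [hcj]; exact h1, hiff.mp h2⟩
    rw [fixB]
    rw [if_neg (fun h => hnc ⟨Or.inl h.1, h.2⟩), if_neg (fun h => hnc ⟨Or.inr h.1, h.2⟩)]
    rw [ih (j + 1) (some c) hcs (prev_iff_step l j c hcj)
      (fun j' hj' => hnone j' (by omega))]

-- fixB changes a suffix that contains a convertible quote
lemma fixB_ne (l : List Char) : ∀ (rest : List Char) (j : Nat) (prev : Option Char),
    rest = l.drop j →
    ((prev = none ∨ prev = some ' ') ↔ (j = 0 ∨ l.getD (j - 1) ' ' = ' ')) →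
    (∃ j', j ≤ j' ∧ j' < l.length ∧ (l.getD j' ' ' = '"' ∨ l.getD j' ' ' = '\'') ∧
      (j' = 0 ∨ l.getD (j' - 1) ' ' = ' ')) →
    fixB prev rest ≠ rest := by
  intro rest
  induction rest with
  | nil =>
    intro j prev hrest _ ⟨j', hj1, hj2, _⟩
    have := congrArg List.length hrest; simp at this; omega
  | cons c cs ih =>
    intro j prev hrest hiff ⟨j', hj1, hj2, hq, hcv⟩
    have hjn : j < l.length := by
      have := congrArg List.length hrest; simp at this; omega
    have hget : l[j]? = some c := by
      have h1 : (l.drop j).head? = some c := by rw [← hrest]; rfl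
      rwa [List.head?_drop] at h1
    have hcj : l.getD j ' ' = c := by rw [List.getD_eq_getElem?_getD, hget]; rfl
    have hcs : cs = l.drop (j + 1) := by
      have h2 : (l.drop j).tail = cs := by rw [← hrest]; rfl
      rw [← h2, List.tail_drop]
    have hiff' := prev_iff_step l j c hcj
    rw [fixB]
    by_cases h1 : c = '"' ∧ (prev = none ∨ prev = some ' ')
    · rw [if_pos h1]; intro h; rw [h1.1] at h; injection h with h; exact absurd h (by decide)
    · rw [if_neg h1]
      by_cases h2 : c = '\'' ∧ (prev = none ∨ prev = some ' ')
      · rw [if_pos h2]; intro h; rw [h2.1] at h; injection h with h; exact absurd h (by decide)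
      · rw [if_neg h2]
        have hj1' : j + 1 ≤ j' := by
          rcases Nat.lt_or_ge j j' with h | h
          · omega
          · exfalso
            have : j' = j := by omega
            subst this
            rw [hcj] at hq
            rcases hq with h | h
            · exact h1 ⟨h, hiff.mpr hcv⟩
            · exact h2 ⟨h, hiff.mpr hcv⟩
        intro h
        injection h with _ h
        exact ih (j + 1) (some c) hcs hiff' ⟨j', hj1', hj2, hq, hcv⟩ h

-- outside D_: the lag pass equals the natural pass
lemma lag_natural (l : List Char) : ∀ (rest : List Char) (j : Nat) (prev : Option Char),
    rest = l.drop j →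
    ((prev = none ∨ prev = some ' ') ↔ (j = 0 ∨ l.getD (j - 1) ' ' = ' ')) →
    (∀ j', j ≤ j' → j' < l.length → (l.getD j' ' ' = '"' ∨ l.getD j' ' ' = '\'') →
      (j' = 0 ∨ l.getD (j' - 1) ' ' = ' ') → j' + pvDQLag l j' < l.length) →
    fixB_go l j (pvDQLag l j) rest = fixB prev rest := by
  intro rest
  induction rest with
  | nil => intro j prev _ _ _; rfl
  | cons c cs ih =>
    intro j prev hrest hiff hsafe
    have hjn : j < l.length := by
      have := congrArg List.length hrest; simp at this; omega
    have hget : l[j]? = some c := by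
      have h1 : (l.drop j).head? = some c := by rw [← hrest]; rfl
      rwa [List.head?_drop] at h1
    have hcj : l.getD j ' ' = c := by rw [List.getD_eq_getElem?_getD, hget]; rfl
    have hcs : cs = l.drop (j + 1) := by
      have h2 : (l.drop j).tail = cs := by rw [← hrest]; rfl
      rw [← h2, List.tail_drop]
    have hiff' := prev_iff_step l j c hcj
    have hsafe' : (∀ j', j + 1 ≤ j' → j' < l.length → (l.getD j' ' ' = '"' ∨ l.getD j' ' ' = '\'') →
        (j' = 0 ∨ l.getD (j' - 1) ' ' = ' ') → j' + pvDQLag l j' < l.length) :=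
      fun j' hj' => hsafe j' (by omega)
    by_cases hb : l.length ≤ j + pvDQLag l j
    · -- all later positions exceed the budget too, so no convertible quote remains
      rw [fixB_go, if_pos hb]
      refine (fixB_id l (c :: cs) j prev hrest hiff ?_).symm
      intro j' hj1 hj2 ⟨hq, hcv⟩
      have hm := lag_mono l j (j' - j)
      rw [show j + (j' - j) = j' by omega] at hm
      have := hsafe j' hj1 hj2 hq hcv
      omega
    · rw [fixB_go, if_neg hb, fixB]
      simp only [hiff]
      by_cases h1 : c = '"' ∧ (j = 0 ∨ l.getD (j - 1) ' ' = ' ')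
      · rw [if_pos h1, if_pos h1]
        have hstep : pvDQLag l j + 1 = pvDQLag l (j + 1) := by
          rw [pvDQLag_succ l j hjn, if_pos ⟨by rw [hcj]; exact h1.1, (pvIsConv_iff l j).mpr h1.2⟩]
        rw [hstep, ih (j + 1) (some c) hcs hiff' hsafe']
      · rw [if_neg h1, if_neg h1]
        have hstep : pvDQLag l j = pvDQLag l (j + 1) := by
          rw [pvDQLag_succ l j hjn]
          rw [if_neg (by
            intro ⟨ha, hb2⟩
            exact h1 ⟨by rw [← hcj]; exact ha, (pvIsConv_iff l j).mp hb2⟩)]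
          omega
        by_cases h2 : c = '\'' ∧ (j = 0 ∨ l.getD (j - 1) ' ' = ' ')
        · rw [if_pos h2, if_pos h2, hstep, ih (j + 1) (some c) hcs hiff' hsafe']
        · rw [if_neg h2, if_neg h2, hstep, ih (j + 1) (some c) hcs hiff' hsafe']

-- inside D_: the lag pass differs from the natural pass
lemma lag_differs (l : List Char) : ∀ (rest : List Char) (j : Nat) (prev : Option Char),
    rest = l.drop j →
    ((prev = none ∨ prev = some ' ') ↔ (j = 0 ∨ l.getD (j - 1) ' ' = ' ')) →
    (∃ j', j ≤ j' ∧ j' < l.length ∧ (l.getD j' ' ' = '"' ∨ l.getD j' ' ' = '\'') ∧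
      (j' = 0 ∨ l.getD (j' - 1) ' ' = ' ') ∧ l.length ≤ j' + pvDQLag l j') →
    fixB_go l j (pvDQLag l j) rest ≠ fixB prev rest := by
  intro rest
  induction rest with
  | nil =>
    intro j prev hrest _ ⟨j', hj1, hj2, _⟩
    have := congrArg List.length hrest; simp at this; omega
  | cons c cs ih =>
    intro j prev hrest hiff ⟨j', hj1, hj2, hq, hcv, hbad⟩
    have hjn : j < l.length := by
      have := congrArg List.length hrest; simp at this; omega
    have hget : l[j]? = some c := by
      have h1 : (l.drop j).head? = some c := by rw [← hrest]; rfl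
      rwa [List.head?_drop] at h1
    have hcj : l.getD j ' ' = c := by rw [List.getD_eq_getElem?_getD, hget]; rfl
    have hcs : cs = l.drop (j + 1) := by
      have h2 : (l.drop j).tail = cs := by rw [← hrest]; rfl
      rw [← h2, List.tail_drop]
    have hiff' := prev_iff_step l j c hcj
    by_cases hb : l.length ≤ j + pvDQLag l j
    · rw [fixB_go, if_pos hb]
      exact fun h => fixB_ne l (c :: cs) j prev hrest hiff ⟨j', hj1, hj2, hq, hcv⟩ h.symm
    · have hj1' : j + 1 ≤ j' := by
        rcases Nat.lt_or_ge j j' with h | h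
        · omega
        · exfalso; have : j' = j := by omega
          subst this; omega
      rw [fixB_go, if_neg hb, fixB]
      simp only [hiff]
      by_cases h1 : c = '"' ∧ (j = 0 ∨ l.getD (j - 1) ' ' = ' ')
      · rw [if_pos h1, if_pos h1]
        have hstep : pvDQLag l j + 1 = pvDQLag l (j + 1) := by
          rw [pvDQLag_succ l j hjn, if_pos ⟨by rw [hcj]; exact h1.1, (pvIsConv_iff l j).mpr h1.2⟩]
        rw [hstep]
        intro h
        injection h with _ h
        injection h with _ h
        exact ih (j + 1) (some c) hcs hiff' ⟨j', hj1', hj2, hq, hcv, hbad⟩ h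
      · rw [if_neg h1, if_neg h1]
        have hstep : pvDQLag l j = pvDQLag l (j + 1) := by
          rw [pvDQLag_succ l j hjn]
          rw [if_neg (by
            intro ⟨ha, hb2⟩
            exact h1 ⟨by rw [← hcj]; exact ha, (pvIsConv_iff l j).mp hb2⟩)]
          omega
        rw [hstep]
        by_cases h2 : c = '\'' ∧ (j = 0 ∨ l.getD (j - 1) ' ' = ' ')
        · rw [if_pos h2, if_pos h2]
          intro h
          injection h with _ h
          exact ih (j + 1) (some c) hcs hiff' ⟨j', hj1', hj2, hq, hcv, hbad⟩ h
        · rw [if_neg h2, if_neg h2]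
          intro h
          injection h with _ h
          exact ih (j + 1) (some c) hcs hiff' ⟨j', hj1', hj2, hq, hcv, hbad⟩ h

-- A's foldl, as the lag pass from the start
lemma fix_quotes_eq_go (s : String) :
    fix_quotes s = String.ofList (fixB_go s.toList 0 0 s.toList) := by
  unfold fix_quotes
  have h := main_inv s.toList s.toList [] 0 0 (by simp) rfl (fun _ => rfl)
    (fun h => absurd rfl h)
  simp only [List.nil_append] at h
  norm_num at h
  rw [show (s.toList.length : Int) = (s.length : Int) by simp, h]

-- the change region, in index form
lemma D_iff (s : String) : D_fix_quotes s ↔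
    ∃ j, j < s.toList.length ∧ (s.toList.getD j ' ' = '"' ∨ s.toList.getD j ' ' = '\'') ∧
      pvIsConv s.toList j = true ∧ s.toList.length ≤ j + pvDQLag s.toList j := by
  unfold D_fix_quotes
  constructor
  · rintro ⟨⟨p, j⟩, hmem, hq, hb⟩
    rw [show pvIsQ (p, j) = (pvIsDQ (p, j) || p == (' ', '\'')) from rfl] at hq
    rw [pvPairs_eq_zip] at hmem
    have hget := List.mk_mem_zipIdx_iff_getElem?.mp hmem
    have hj : j < s.toList.length := by
      obtain ⟨hlt, -⟩ := List.getElem?_eq_some_iff.mp hget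
      simpa [List.length_zip] using hlt
    rw [pvZip_getElem? s.toList j hj] at hget
    obtain rfl : p = ((' ' :: s.toList).getD j ' ', s.toList.getD j ' ') := by
      injection hget with h; exact h.symm
    refine ⟨j, hj, ?_, ?_, hb⟩
    · simp only [Bool.or_eq_true, pvIsDQ, beq_iff_eq, Prod.ext_iff] at hq
      rcases hq with h | h
      · exact Or.inl h.2
      · exact Or.inr h.2
    · simp only [Bool.or_eq_true, pvIsDQ, beq_iff_eq, Prod.ext_iff] at hq
      have hsp : (' ' :: s.toList).getD j ' ' = ' ' := by
        rcases hq with h | h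
        · exact h.1
        · exact h.1
      cases j with
      | zero => simp [pvIsConv]
      | succ k =>
        simp only [List.getD_cons_succ] at hsp
        rw [List.getD_eq_getElem?_getD] at hsp
        simp [pvIsConv, hsp]
  · rintro ⟨j, hj, hq, hc, hb⟩
    refine ⟨(((' ' :: s.toList).getD j ' ', s.toList.getD j ' '), j),
      by
        rw [pvPairs_eq_zip]
        exact List.mk_mem_zipIdx_iff_getElem?.mpr (pvZip_getElem? s.toList j hj), ?_, hb⟩
    rw [show ∀ p, pvIsQ (p, j) = (pvIsDQ (p, j) || p == (' ', '\'')) from fun _ => rfl]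
    have hsp : (' ' :: s.toList).getD j ' ' = ' ' := by
      rcases (by simpa [pvIsConv, Bool.or_eq_true] using hc :
          j = 0 ∨ s.toList.getD (j - 1) ' ' = ' ') with h | h
      · subst h; rfl
      · cases j with
        | zero => rfl
        | succ k => simpa using h
    simp only [Bool.or_eq_true, pvIsDQ, beq_iff_eq, Prod.ext_iff]
    rcases hq with h | h
    · exact Or.inl ⟨hsp, h⟩
    · exact Or.inr ⟨hsp, h⟩

-- the join-accumulator loop of the port is the one-pass transformation
lemma fixB_loop_join (cs : List Char) : ∀ (prev : Option Char) (out : List String),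
    (String.join (fixB_loop prev cs out)).toList
      = (String.join out).toList ++ fixB prev cs := by
  induction cs with
  | nil => intro prev out; simp [fixB_loop, fixB]
  | cons c cs ih =>
    intro prev out
    rw [fixB_loop, fixB]
    by_cases h1 : c = '"' ∧ (prev = none ∨ prev = some ' ')
    · rw [if_pos h1, if_pos h1, ih]
      simp [String.toList_join]
    · rw [if_neg h1, if_neg h1]
      by_cases h2 : c = '\'' ∧ (prev = none ∨ prev = some ' ')
      · rw [if_pos h2, if_pos h2, ih]
        simp [String.toList_join]
      · rw [if_neg h2, if_neg h2, ih]
        simp [String.toList_join]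

lemma fix_quotes_alt_toList (s : String) : (fix_quotes_alt s).toList = fixB none s.toList := by
  unfold fix_quotes_alt
  rw [fixB_loop_join]
  simp [String.toList_join]

-- ===== VERDICT (by name: the statement is the Claim_ definition above) =====
theorem fix_quotes_spec : Claim_unchanged_fix_quotes := by
  intro s _ hD
  rw [D_iff] at hD
  push Not at hD
  rw [fix_quotes_eq_go]
  refine String.toList_injective ?_
  rw [fix_quotes_alt_toList]
  simp only [String.toList_ofList]
  have h0 : (0 : Nat) = pvDQLag s.toList 0 := (pvDQLag_zero s.toList).symm
  rw [h0]
  refine lag_natural s.toList s.toList 0 none (by simp) (by simp) ?_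
  intro j' _ h1 h2 h3
  have := hD j' h1 h2 ((pvIsConv_iff s.toList j').mpr h3)
  omega

theorem fix_quotes_changed : Claim_changed_fix_quotes := by
  unfold Claim_changed_fix_quotes
  refine ⟨by decide, by decide, by decide, by decide, by decide⟩

theorem fix_quotes_tight : Claim_exact_fix_quotes := by
  intro s _ hD
  obtain ⟨j, hj, hq, hc, hb⟩ := (D_iff s).mp hD
  rw [fix_quotes_eq_go]
  intro h
  have h2 := congrArg String.toList h
  rw [fix_quotes_alt_toList] at h2
  simp only [String.toList_ofList] at h2
  have h0 : (0 : Nat) = pvDQLag s.toList 0 := (pvDQLag_zero s.toList).symm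
  rw [h0] at h2
  exact lag_differs s.toList s.toList 0 none (by simp) (by simp)
    ⟨j, Nat.zero_le j, hj, hq, (pvIsConv_iff s.toList j).mp hc, hb⟩ h2
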